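-- pv_equiv track=rewrite | github.com/eletricmine333/An-Alternative-Conversion-Method-from-a-Higher-to-a-Lower-Positive-Integer-Base-Number | main.py | add_elements_in_target_base
-- ===== SOURCE A (Python) =====
-- def add_elements_in_target_base(clist, target_base):
--     """
--     Add all elements in the list directly in the target base and return the sum in the target base.
--     """
--     result = []
--     carry = 0
--     max_length = max(len(num) for num in clist)
--     padded_clist = [num.zfill(max_length) for num in clist]
--     for i in range(max_length - 1, -1, -1):
--         digit_sum = carry
--         for num in padded_clist:
--             digit = num[i]
--             if '0' <= digit <= '9':
--                 digit_value = int(digit)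
--             else:
--                 digit_value = ord(digit.upper()) - ord('A') + 10
--             digit_sum += digit_value
--         new_digit_value = digit_sum % target_base
--         carry = digit_sum // target_base
--         if new_digit_value < 10:
--             result.append(str(new_digit_value))
--         else:
--             result.append(chr(new_digit_value - 10 + ord('A')))
--     while carry > 0:
--         new_digit_value = carry % target_base
--         carry //= target_base
--         if new_digit_value < 10:
--             result.append(str(new_digit_value))
--         else:
--             result.append(chr(new_digit_value - 10 + ord('A')))
--     result.reverse()
--     return ''.join(result)
-- ===== SOURCE B (Python) =====
-- def add_elements_in_target_base(clist, target_base):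
--     """
--     Add all elements in the list directly in the target base and return the sum in the target base.
--     Alternative: parse every (zfill-padded) element into one integer total, then
--     emit the target-base digits of the total by repeated divmod.
--     """
--     max_length = max(len(num) for num in clist)
--     total = 0
--     for num in clist:
--         value = 0
--         for digit in num.zfill(max_length):
--             if '0' <= digit <= '9':
--                 value = value * target_base + int(digit)
--             else:
--                 value = value * target_base + ord(digit.upper()) - ord('A') + 10
--         total += value
--     digits = []
--     for _ in range(max_length):
--         total, r = divmod(total, target_base)
--         digits.append(str(r) if r < 10 else chr(r - 10 + ord('A')))
--     while total > 0:
--         total, r = divmod(total, target_base)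
--         digits.append(str(r) if r < 10 else chr(r - 10 + ord('A')))
--     return ''.join(reversed(digits))
-- ===== Notes on version B (the rewrite author's own statement) =====
-- stated objective: alternative
-- what changed: A adds the numbers column by column from the right, propagating a carry per column; B parses every (zfill-padded) element into one integer with a Horner fold, sums them into a single total, and emits the target-base digits of that total by repeated divmod.
-- outside the precondition, e.g. on add_elements_in_target_base([], 2): A raises ValueError, B raises ValueError; on add_elements_in_target_base(['1'], 0): A raises ZeroDivisionError, B raises ZeroDivisionError; on add_elements_in_target_base([' ', 'ZZ'], 65536): A returns 'ZC', B returns 'ZC'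
import Mathlib
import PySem

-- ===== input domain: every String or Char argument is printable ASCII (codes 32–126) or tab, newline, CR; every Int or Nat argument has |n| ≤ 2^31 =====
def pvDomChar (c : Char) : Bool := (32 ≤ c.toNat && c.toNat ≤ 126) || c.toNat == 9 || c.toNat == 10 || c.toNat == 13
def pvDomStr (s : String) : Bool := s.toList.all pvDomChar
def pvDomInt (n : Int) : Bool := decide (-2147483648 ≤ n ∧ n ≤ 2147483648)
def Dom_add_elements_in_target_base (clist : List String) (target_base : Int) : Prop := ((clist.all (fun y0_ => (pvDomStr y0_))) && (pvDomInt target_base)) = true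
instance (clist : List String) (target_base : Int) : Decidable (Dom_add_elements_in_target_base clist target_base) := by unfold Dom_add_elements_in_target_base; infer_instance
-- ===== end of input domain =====

-- B re-implements A by parsing every padded element into one integer total and emitting the
-- target-base digits of that total by repeated divmod, instead of A's column-by-column addition
-- with a carry; a genuinely different algorithm of similar cost (objective: alternative).

-- ===== PORT A =====

-- shared digit snippet of BOTH Pythons: int(d) if '0'<=d<='9' else ord(d.upper())-ord('A')+10
def pvDigitVal (c : Char) : Int :=
  if '0' ≤ c ∧ c ≤ '9' then (c.toNat : Int) - 48
  else ((PySem.Chars.upperChar c).toNat : Int) - 65 + 10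

-- shared digit-rendering snippet of BOTH Pythons: str(v) if v < 10 else chr(v - 10 + ord('A'));
-- chr is ported as Char.ofNat, exact for codes below U+D800 (Pre_ keeps every emitted code there)
def pvRender (v : Int) : String :=
  if v < 10 then PySem.Int.toStr v
  else String.mk [Char.ofNat (v - 10 + 65).toNat]

-- the identical `while carry > 0` loop closing BOTH Pythons; the guard `2 ≤ b ∨ b ≤ -1` only
-- makes the recursion total (Python diverges at b = 1 and raised at b = 0, both outside Pre_)
def pvCarryLoop (carry b : Int) (acc : List String) : List String :=
  if h' : 0 < carry ∧ (2 ≤ b ∨ b ≤ -1) then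
    pvCarryLoop (PySem.Int.floordiv carry b) b (acc ++ [pvRender (PySem.Int.mod carry b)])
  else acc
termination_by (if carry ≤ 0 then 0 else carry.toNat + 1)
decreasing_by
  rcases h' with ⟨hc, hb | hb⟩
  · have he : PySem.Int.floordiv carry b = carry / b := PySem.Int.floordiv_eq_ediv_of_pos (by omega)
    have h5 := Int.mul_ediv_add_emod carry b
    have h4 := Int.emod_nonneg carry (by omega : b ≠ 0)
    have h6 := Int.ediv_nonneg (le_of_lt hc) (by omega : (0:Int) ≤ b)
    rw [he]
    have hlt : carry / b < carry := by nlinarith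
    generalize carry / b = q at hlt h6
    split_ifs <;> omega
  · have : PySem.Int.floordiv carry b ≤ 0 :=
      Int.fdiv_nonpos_of_nonneg_of_nonpos (le_of_lt hc) (by omega)
    simp only [PySem.Int.floordiv] at this
    simp only [PySem.Int.floordiv]
    generalize carry.fdiv b = q at this
    split_ifs <;> omega

-- transliteration of A: max_length, zfill-padding, one pass per column from the right
-- (digit_sum = carry + the column's digit values, emit digit_sum % b, carry = digit_sum // b),
-- then the trailing carry loop, reverse and join
def add_elements_in_target_base (clist : List String) (target_base : Int) : String :=
  let maxLength : Nat := (clist.map (fun num => num.toList.length)).foldl Nat.max 0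
  let padded : List (List Char) := clist.map (fun num => (PySem.Str.zfill num (maxLength : Int)).toList)
  let st := (PySem.List.pyRange ((maxLength : Int) - 1) (-1) (-1)).foldl
    (fun (st : List String × Int) i =>
      let digit_sum := padded.foldl
        (fun acc num => acc + pvDigitVal ((PySem.List.pyGet? num i).getD '0')) st.2
      (st.1 ++ [pvRender (PySem.Int.mod digit_sum target_base)],
        PySem.Int.floordiv digit_sum target_base)) ([], 0)
  let result := pvCarryLoop st.2 target_base st.1
  String.join result.reverse

-- ===== PORT B =====

-- transliteration of B (Source B): every padded element is parsed into an integer (value = value*b + digit),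
-- all values are summed into one total, and the digits of the total are peeled off by divmod
def add_elements_in_target_base_alt (clist : List String) (target_base : Int) : String :=
  let maxLength : Nat := (clist.map (fun num => num.toList.length)).foldl Nat.max 0
  let total : Int := clist.foldl
    (fun t num => t + (PySem.Str.zfill num (maxLength : Int)).toList.foldl
      (fun v c => v * target_base + pvDigitVal c) 0) 0
  let st := (List.range maxLength).foldl
    (fun (st : Int × List String) _ =>
      (PySem.Int.floordiv st.1 target_base,
        st.2 ++ [pvRender (PySem.Int.mod st.1 target_base)])) (total, [])
  let digits := pvCarryLoop st.1 target_base st.2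
  String.join digits.reverse

-- ===== PRECONDITION & SPEC =====
-- Pre_ excludes the empty list (max() raises ValueError), base 0 (ZeroDivisionError), base 1
-- (the carry loop spins forever), and huge bases combined with chars below '0' (space/punctuation
-- digits get negative values, whose floor-mod by a huge base drives chr() past the Unicode range —
-- ValueError — or into surrogates); B agrees with A on the excluded inputs where A happens to return.
def Pre_add_elements_in_target_base (clist : List String) (target_base : Int) : Prop :=
  clist ≠ [] ∧ (target_base ≤ -1 ∨ 2 ≤ target_base) ∧
    (target_base ≤ 55241 ∨ clist.all (fun s => s.toList.all (fun c => 48 ≤ c.toNat)) = true)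
instance (clist : List String) (target_base : Int) : Decidable (Pre_add_elements_in_target_base clist target_base) := by unfold Pre_add_elements_in_target_base; infer_instance

def pvWitness_add_elements_in_target_base : List String × Int := (["19", "A"], 16)

def Spec_add_elements_in_target_base (clist : List String) (target_base : Int) (out : String) : Prop := out = add_elements_in_target_base_alt clist target_base
instance (clist : List String) (target_base : Int) (out : String) : Decidable (Spec_add_elements_in_target_base clist target_base out) := by unfold Spec_add_elements_in_target_base; infer_instance

-- ===== CLAIM (what is proved, stated in full; the proofs are below) =====
def Claim_equal_add_elements_in_target_base : Prop := ∀ (clist : List String) (target_base : Int), Dom_add_elements_in_target_base clist target_base → Pre_add_elements_in_target_base clist target_base → Spec_add_elements_in_target_base clist target_base (add_elements_in_target_base clist target_base)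

-- ===== LEMMAS AND PROOFS =====

-- little-endian Horner value of a digit list
def pvVal (b : Int) : List Int → Int
  | [] => 0
  | s :: ss => s + b * pvVal b ss

-- the common shape of both loops: feed a list of per-step addends through (c+s) divmod b
def pvDchain (b : Int) : List Int → Int → List String → List String × Int
  | [], c, acc => (acc, c)
  | s :: ss, c, acc =>
      pvDchain b ss (PySem.Int.floordiv (c + s) b)
        (acc ++ [pvRender (PySem.Int.mod (c + s) b)])

theorem pv_mod_shift (b x m : Int) : PySem.Int.mod (x + b * m) b = PySem.Int.mod x b := by
  simp only [PySem.Int.mod]; exact Int.add_mul_fmod_self_left x b m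

theorem pv_fdiv_shift (b x m : Int) (hb : b ≠ 0) :
    PySem.Int.floordiv (x + b * m) b = PySem.Int.floordiv x b + m := by
  simp only [PySem.Int.floordiv]; exact Int.add_mul_fdiv_left x m hb

theorem pvDchain_shift (b : Int) (hb : b ≠ 0) :
    ∀ (ss : List Int) (c : Int) (acc : List String),
      pvDchain b ss c acc = pvDchain b (List.replicate ss.length 0) (c + pvVal b ss) acc := by
  intro ss
  induction ss with
  | nil => intro c acc; simp [pvVal]
  | cons s ss ih =>
      intro c acc
      simp only [pvDchain, pvVal, List.length_cons, List.replicate_succ]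
      have h1 : c + (s + b * pvVal b ss) + 0 = (c + s) + b * pvVal b ss := by ring
      rw [h1, pv_mod_shift, pv_fdiv_shift _ _ _ hb, ih]

theorem pvVal_replicate_zero (b : Int) (n : Nat) : pvVal b (List.replicate n 0) = 0 := by
  induction n with
  | zero => rfl
  | succ n ih => simp [List.replicate_succ, pvVal, ih]

theorem pvVal_zipWith_add (b : Int) :
    ∀ (xs ys : List Int), xs.length = ys.length →
      pvVal b (List.zipWith (· + ·) xs ys) = pvVal b xs + pvVal b ys := by
  intro xs
  induction xs with
  | nil =>
      intro ys h
      cases ys with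
      | nil => simp [pvVal]
      | cons y ys => simp at h
  | cons x xs ih =>
      intro ys h
      cases ys with
      | nil => simp at h
      | cons y ys =>
          simp only [List.zipWith_cons_cons, pvVal]
          rw [ih ys (by simpa using h)]
          ring

theorem pvVal_append_single (b : Int) :
    ∀ (xs : List Int) (y : Int), pvVal b (xs ++ [y]) = pvVal b xs + y * b ^ xs.length := by
  intro xs
  induction xs with
  | nil => intro y; simp [pvVal]
  | cons x xs ih =>
      intro y
      simp only [List.cons_append, pvVal, ih, List.length_cons]
      ring

-- the parse fold of Source B equals the Horner value of the reversed digit values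
theorem pv_parse_eq (b : Int) :
    ∀ (cs : List Char) (a : Int),
      cs.foldl (fun v c => v * b + pvDigitVal c) a
        = pvVal b (cs.reverse.map pvDigitVal) + a * b ^ cs.length := by
  intro cs
  induction cs with
  | nil => intro a; simp [pvVal]
  | cons c cs ih =>
      intro a
      simp only [List.foldl_cons, ih, List.reverse_cons, List.map_append, List.map_cons,
        List.map_nil, pvVal_append_single, List.length_reverse, List.length_map, List.length_cons]
      ring

-- column sums of a list of equal-length rows
def pvCols (rows : List (List Int)) (L : Nat) : List Int :=
  (List.range L).map (fun k => (rows.map (fun r => r.getD k 0)).sum)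

theorem pvCols_nil (L : Nat) : pvCols [] L = List.replicate L 0 := by
  apply List.ext_getElem
  · simp [pvCols]
  · intro k h1 h2
    simp [pvCols]

theorem pvCols_cons (r : List Int) (rows : List (List Int)) (L : Nat) (hr : r.length = L) :
    pvCols (r :: rows) L = List.zipWith (· + ·) r (pvCols rows L) := by
  apply List.ext_getElem
  · simp [pvCols, hr]
  · intro k h1 h2
    have hk : k < L := by simpa [pvCols] using h1
    simp only [pvCols, List.getElem_map, List.getElem_range, List.getElem_zipWith, List.map_cons,
      List.sum_cons]
    rw [List.getD_eq_getElem r 0 (by omega)]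

theorem pvVal_cols (b : Int) :
    ∀ (rows : List (List Int)) (L : Nat), (∀ r ∈ rows, r.length = L) →
      pvVal b (pvCols rows L) = (rows.map (pvVal b)).sum := by
  intro rows
  induction rows with
  | nil => intro L _; simp [pvCols_nil, pvVal_replicate_zero]
  | cons r rows ih =>
      intro L h
      rw [pvCols_cons r rows L (h r (by simp))]
      rw [pvVal_zipWith_add b r (pvCols rows L) (by simp [pvCols, h r (by simp)])]
      simp [ih L (fun r hr => h r (by simp [hr]))]

theorem pv_le_foldl_max (l : List Nat) :
    ∀ (a : Nat), a ≤ l.foldl Nat.max a ∧ ∀ x ∈ l, x ≤ l.foldl Nat.max a := by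
  induction l with
  | nil => intro a; simp
  | cons y l ih =>
      intro a
      simp only [List.foldl_cons]
      obtain ⟨h1, h2⟩ := ih (Nat.max a y)
      refine ⟨le_trans (Nat.le_max_left a y) h1, ?_⟩
      intro x hx
      rcases List.mem_cons.mp hx with h | h
      · rw [h]; exact le_trans (Nat.le_max_right a y) h1
      · exact h2 x h

-- A's column loop is a pvDchain over the list of column sums
theorem pv_foldlA (b : Int) (padded : List (List Char)) :
    ∀ (l : List Int) (acc : List String) (c : Int),
      l.foldl (fun (st : List String × Int) i =>
          let digit_sum := padded.foldl
            (fun a num => a + pvDigitVal ((PySem.List.pyGet? num i).getD '0')) st.2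
          (st.1 ++ [pvRender (PySem.Int.mod digit_sum b)], PySem.Int.floordiv digit_sum b)) (acc, c)
        = pvDchain b (l.map (fun i =>
            (padded.map (fun num => pvDigitVal ((PySem.List.pyGet? num i).getD '0'))).sum)) c acc := by
  intro l
  induction l with
  | nil => intro acc c; simp [pvDchain]
  | cons i l ih =>
      intro acc c
      simp only [List.foldl_cons, List.map_cons, pvDchain]
      rw [PySem.List.foldl_add]
      exact ih _ _

-- B's divmod loop is a pvDchain over all-zero addends
theorem pv_foldlB (b : Int) :
    ∀ (l : List Nat) (t : Int) (acc : List String),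
      l.foldl (fun (st : Int × List String) _ =>
          (PySem.Int.floordiv st.1 b, st.2 ++ [pvRender (PySem.Int.mod st.1 b)])) (t, acc)
        = ((pvDchain b (List.replicate l.length 0) t acc).2,
           (pvDchain b (List.replicate l.length 0) t acc).1) := by
  intro l
  induction l with
  | nil => intro t acc; simp [pvDchain]
  | cons x l ih =>
      intro t acc
      simp only [List.foldl_cons, List.length_cons, List.replicate_succ, pvDchain, add_zero]
      exact ih _ _

-- the column-sum list A feeds in (right-to-left indices) is pvCols of the reversed digit rows
theorem pv_ssA_eq_cols (padded : List (List Char)) (L : Nat)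
    (hlen : ∀ r ∈ padded, r.length = L) :
    (PySem.List.pyRange ((L : Int) - 1) (-1) (-1)).map (fun i =>
        (padded.map (fun num => pvDigitVal ((PySem.List.pyGet? num i).getD '0'))).sum)
      = pvCols (padded.map (fun r => r.reverse.map pvDigitVal)) L := by
  rw [PySem.List.pyRange_neg_one]
  have hL : ((L : Int) - 1 - (-1)).toNat = L := by omega
  rw [hL]
  apply List.ext_getElem
  · simp [pvCols]
  · intro k h1 h2
    have hk : k < L := by simpa using h1
    simp only [List.getElem_map, List.getElem_range, pvCols, List.map_map]
    apply congrArg List.sum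
    apply List.map_congr_left
    intro num hmem
    have hr : num.length = L := hlen num hmem
    have hidx : ((L : Int) - 1 - (k : Int)) = ((L - 1 - k : Nat) : Int) := by omega
    beta_reduce
    simp only [Function.comp_apply]
    rw [hidx, PySem.List.pyGet?_natCast,
      List.getElem?_eq_getElem (by omega : L - 1 - k < num.length), Option.getD_some]
    have hk2 : k < (num.reverse.map pvDigitVal).length := by simp [hr, hk]
    rw [List.getD_eq_getElem _ _ hk2]
    simp only [List.getElem_map, List.getElem_reverse]
    have hidx2 : num.length - 1 - k = L - 1 - k := by omega
    simp [hidx2]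

-- the grand total of Source B is the sum of the Horner values of the reversed digit rows
theorem pv_total_eq (b : Int) (clist : List String) (L : Nat) :
    clist.foldl (fun t num => t + (PySem.Str.zfill num (L : Int)).toList.foldl
        (fun v c => v * b + pvDigitVal c) 0) 0
      = (((clist.map (fun num => (PySem.Str.zfill num (L : Int)).toList)).map
          (fun r => r.reverse.map pvDigitVal)).map (pvVal b)).sum := by
  rw [PySem.List.foldl_add, zero_add, List.map_map, List.map_map]
  apply congrArg List.sum
  apply List.map_congr_left
  intro num _
  simp [pv_parse_eq]

theorem pv_padded_len (clist : List String) (num : String) (hmem : num ∈ clist) :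
    (PySem.Str.zfill num
        (((clist.map (fun num => num.toList.length)).foldl Nat.max 0 : Nat) : Int)).toList.length
      = (clist.map (fun num => num.toList.length)).foldl Nat.max 0 := by
  rw [PySem.Str.toList_zfill, PySem.Chars.length_zfill]
  have hle : num.toList.length ≤ (clist.map (fun num => num.toList.length)).foldl Nat.max 0 :=
    (pv_le_foldl_max (clist.map (fun num => num.toList.length)) 0).2 _
      (List.mem_map.mpr ⟨num, hmem, rfl⟩)
  omega

-- ===== VERDICT (by name: the statement is the Claim_ definition above) =====
theorem add_elements_in_target_base_spec : Claim_equal_add_elements_in_target_base := by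
  intro clist b _ hpre
  have hb : b ≠ 0 := by rcases hpre with ⟨_, h2 | h2, _⟩ <;> omega
  unfold Spec_add_elements_in_target_base
  simp only [add_elements_in_target_base, add_elements_in_target_base_alt]
  rw [pv_foldlA, pv_foldlB]
  have hlen : ∀ r ∈ clist.map (fun num =>
      (PySem.Str.zfill num (((clist.map (fun num => num.toList.length)).foldl Nat.max 0 : Nat) : Int)).toList),
      r.length = (clist.map (fun num => num.toList.length)).foldl Nat.max 0 := by
    intro r hr
    obtain ⟨num, hmem, rfl⟩ := List.mem_map.mp hr
    exact pv_padded_len clist num hmem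
  rw [pv_ssA_eq_cols _ _ hlen]
  rw [pvDchain_shift b hb _ 0 []]
  rw [pv_total_eq b clist]
  have hcl : (pvCols ((clist.map (fun num =>
      (PySem.Str.zfill num (((clist.map (fun num => num.toList.length)).foldl Nat.max 0 : Nat) : Int)).toList)).map
        (fun r => r.reverse.map pvDigitVal)) ((clist.map (fun num => num.toList.length)).foldl Nat.max 0)).length
      = (clist.map (fun num => num.toList.length)).foldl Nat.max 0 := by
    simp [pvCols]
  rw [hcl]
  rw [pvVal_cols b _ _ (by
    intro r hr
    obtain ⟨r0, hr0, rfl⟩ := List.mem_map.mp hr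
    simp [hlen r0 hr0])]
  simp
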